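-- pv_equiv track=rewrite | github.com/tishyk/codespacedirstructure | T3. Code Testing/Unittest/Task 7/find_not_appears_twice_elements.py | find_not_appears_twice_elements
-- ===== SOURCE A (Python) =====
-- def find_not_appears_twice_elements(elements):
--     if type(elements) is not list:
--         raise ValueError("Should be passed list")
--
--     found_twice = set()
--     found = set()
--     for el in elements:
--         if not el in found:
--             found.add(el)
--         else:
--             found_twice.add(el)
--
--     return set(elements) - found_twice
-- ===== SOURCE B (Python) =====
-- def find_not_appears_twice_elements(elements):
--     if type(elements) is not list:
--         raise ValueError("Should be passed list")
--
--     counts = {}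
--     for el in elements:
--         counts[el] = counts.get(el, 0) + 1
--
--     return {x for x, c in counts.items() if c == 1}
-- ===== Notes on version B (the rewrite author's own statement) =====
-- stated objective: idiomatic
-- what changed: Replaces A's two-set incremental membership tracking (found/found_twice) and final set-subtraction with a single frequency table built in one pass, then a comprehension keeping the elements whose count is exactly 1.
import Mathlib
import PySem

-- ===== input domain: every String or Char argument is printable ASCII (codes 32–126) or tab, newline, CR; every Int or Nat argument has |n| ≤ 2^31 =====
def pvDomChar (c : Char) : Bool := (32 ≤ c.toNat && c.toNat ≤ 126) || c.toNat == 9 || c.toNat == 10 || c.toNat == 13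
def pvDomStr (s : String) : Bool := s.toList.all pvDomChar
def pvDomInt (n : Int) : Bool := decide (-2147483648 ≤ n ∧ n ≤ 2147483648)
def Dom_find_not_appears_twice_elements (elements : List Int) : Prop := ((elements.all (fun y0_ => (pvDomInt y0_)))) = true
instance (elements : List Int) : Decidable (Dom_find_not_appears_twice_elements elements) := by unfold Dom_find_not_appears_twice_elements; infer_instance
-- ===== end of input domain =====

-- ===== PORT A =====
-- B replaces A's two-set incremental tracking and set subtraction by a one-pass
-- frequency table filtered for count == 1 (idiomatic count-then-filter decomposition).
def find_not_appears_twice_elements (elements : List Int) : List Int :=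
  -- type(elements) is not list: always false under the type convention, so no raise
  let st := elements.foldl
    (fun (p : PySem.Set Int × PySem.Set Int) el =>
      if !(PySem.Set.contains p.2 el) then (p.1, PySem.Set.add p.2 el)
      else (PySem.Set.add p.1 el, p.2))
    (PySem.Set.empty, PySem.Set.empty)
  PySem.Set.diff (PySem.Set.ofList elements) st.1

-- ===== PORT B =====
def find_not_appears_twice_elements_alt (elements : List Int) : List Int :=
  let counts : PySem.Dict Int Int :=
    elements.foldl (fun d el => d.insert el (d.getD el 0 + 1)) PySem.Dict.empty
  PySem.Set.ofList (((counts.items).filter (fun p => p.2 == 1)).map (fun p => p.1))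

-- ===== PRECONDITION & SPEC =====
def Spec_find_not_appears_twice_elements (elements : List Int) (out : List Int) : Prop := out = find_not_appears_twice_elements_alt elements
instance (elements : List Int) (out : List Int) : Decidable (Spec_find_not_appears_twice_elements elements out) := by unfold Spec_find_not_appears_twice_elements; infer_instance

-- ===== CLAIM (what is proved, stated in full; the proofs are below) =====
def Claim_equal_find_not_appears_twice_elements : Prop := ∀ (elements : List Int), Dom_find_not_appears_twice_elements elements → Spec_find_not_appears_twice_elements elements (find_not_appears_twice_elements elements)

-- ===== LEMMAS AND PROOFS =====

-- Invariant of A's loop: membership in the accumulated `found_twice` set.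
theorem loopA_mem (l : List Int) (tw fd : PySem.Set Int) (x : Int) :
    (x ∈ (l.foldl
      (fun (p : PySem.Set Int × PySem.Set Int) el =>
        if !(PySem.Set.contains p.2 el) then (p.1, PySem.Set.add p.2 el)
        else (PySem.Set.add p.1 el, p.2))
      (tw, fd)).1) ↔
      x ∈ tw ∨ (x ∈ fd ∧ x ∈ l) ∨ (x ∉ fd ∧ 2 ≤ l.count x) := by
  induction l generalizing tw fd with
  | nil => simp
  | cons el rest ih =>
    simp only [List.foldl_cons]
    by_cases hel : el ∈ fd
    · rw [if_neg (by simp [hel])]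
      rw [ih]
      by_cases hx : x = el
      · subst hx
        simp [PySem.Set.mem_add, hel]
      · have hcc : List.count x (el :: rest) = List.count x rest := by
          rw [List.count_cons]; simp [Ne.symm hx]
        simp [PySem.Set.mem_add, hx, hcc]
    · rw [if_pos (by simp [hel])]
      rw [ih]
      by_cases hx : x = el
      · subst hx
        rw [List.count_cons_self]
        constructor
        · rintro (h | ⟨hm, hr⟩ | ⟨hm, _⟩)
          · exact Or.inl h
          · rcases (PySem.Set.mem_add _ _ _).1 hm with h1 | h1
            · exact absurd h1 hel
            · refine Or.inr (Or.inr ⟨hel, ?_⟩)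
              have := List.count_pos_iff.2 hr
              omega
          · exact absurd ((PySem.Set.mem_add _ _ _).2 (Or.inr rfl)) hm
        · rintro (h | ⟨hm, _⟩ | ⟨_, hc⟩)
          · exact Or.inl h
          · exact absurd hm hel
          · have : 0 < rest.count x := by omega
            exact Or.inr (Or.inl ⟨(PySem.Set.mem_add _ _ _).2 (Or.inr rfl),
              List.count_pos_iff.1 this⟩)
      · have hcc : List.count x (el :: rest) = List.count x rest := by
          rw [List.count_cons]; simp [Ne.symm hx]
        simp only [hcc, PySem.Set.mem_add, List.mem_cons]
        constructor
        · rintro (h | ⟨hm, hr⟩ | ⟨hm, hc⟩)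
          · exact Or.inl h
          · rcases hm with h1 | h1
            · exact Or.inr (Or.inl ⟨h1, Or.inr hr⟩)
            · exact absurd h1 hx
          · exact Or.inr (Or.inr ⟨fun h => hm (Or.inl h), hc⟩)
        · rintro (h | ⟨hm, hr⟩ | ⟨hm, hc⟩)
          · exact Or.inl h
          · rcases hr with h1 | h1
            · exact absurd h1 hx
            · exact Or.inr (Or.inl ⟨Or.inl hm, h1⟩)
          · refine Or.inr (Or.inr ⟨fun h => ?_, hc⟩)
            rcases h with h1 | h1
            · exact hm h1
            · exact hx h1

-- B's filtered items list, rewritten as a filter of the deduplicated input.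
theorem altB_eq_filter (elements : List Int) :
    find_not_appears_twice_elements_alt elements =
      (PySem.Set.ofList elements).filter (fun k => (elements.count k : Int) == 1) := by
  unfold find_not_appears_twice_elements_alt
  rw [PySem.Dict.foldl_insert_getD_add_one_eq_counter]
  show PySem.Set.ofList
      (((PySem.Dict.counter elements).items.filter (fun p => p.2 == 1)).map (fun p => p.1)) = _
  rw [PySem.Dict.items_counter, List.filter_map, List.map_map]
  simp only [Function.comp_def, List.map_id']
  exact PySem.Set.ofList_eq_self_of_nodup _
    ((PySem.Set.nodup_ofList elements).filter _)

-- ===== VERDICT (by name: the statement is the Claim_ definition above) =====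
theorem find_not_appears_twice_elements_spec : Claim_equal_find_not_appears_twice_elements := by
  intro elements _
  show find_not_appears_twice_elements elements = find_not_appears_twice_elements_alt elements
  rw [altB_eq_filter]
  have hA : find_not_appears_twice_elements elements =
      (PySem.Set.ofList elements).filter
        (fun x => !(PySem.Set.contains
          ((elements.foldl
            (fun (p : PySem.Set Int × PySem.Set Int) el =>
              if !(PySem.Set.contains p.2 el) then (p.1, PySem.Set.add p.2 el)
              else (PySem.Set.add p.1 el, p.2))
            (PySem.Set.empty, PySem.Set.empty)).1) x)) := rfl
  rw [hA]
  have hloop := fun x => loopA_mem elements PySem.Set.empty PySem.Set.empty x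
  generalize hTW : (elements.foldl
      (fun (p : PySem.Set Int × PySem.Set Int) el =>
        if !(PySem.Set.contains p.2 el) then (p.1, PySem.Set.add p.2 el)
        else (PySem.Set.add p.1 el, p.2))
      (PySem.Set.empty, PySem.Set.empty)).1 = TW at hloop ⊢
  apply List.filter_congr
  intro x hx
  have hmem : x ∈ elements := (PySem.Set.mem_ofList _ _).1 hx
  have hcnt : 1 ≤ elements.count x := List.count_pos_iff.2 hmem
  have htw : x ∈ TW ↔ 2 ≤ elements.count x := by
    rw [hloop x]
    simp [PySem.Set.empty]
  cases hcb : PySem.Set.contains TW x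
  · have hxin : x ∉ TW := by
      intro h
      rw [(PySem.Set.contains_iff _ _).2 h] at hcb
      exact absurd hcb (by decide)
    have hn2 : ¬ 2 ≤ elements.count x := fun h => hxin (htw.2 h)
    have heq : (elements.count x : Int) = 1 := by
      have : elements.count x = 1 := by omega
      exact_mod_cast this
    simp [heq]
  · have hxin : x ∈ TW := (PySem.Set.contains_iff _ _).1 hcb
    have h2 := htw.1 hxin
    have hne : ¬ ((elements.count x : Int) = 1) := by
      intro h
      have : elements.count x = 1 := by exact_mod_cast h
      omega
    simp [hne]
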